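-- pv_equiv track=rewrite | github.com/981377660LMT/algorithm-study | 9_排序和搜索/二分/经典题/超出后相减/银联-03. 理财产品-二分price.py | maxInvestment
-- ===== SOURCE A (Python) =====
-- from typing import List
--
-- MOD = int(1e9 + 7)
--
-- def maxInvestment(product: List[int], limit: int) -> int:
--     def check(mid: int) -> bool:
--         res = 0
--         for num in product:
--             res += max(0, num - mid + 1)
--             if res >= limit:
--                 return True
--         return res >= limit
--
--     # 特判，恰好limit
--     left, right = 0, int(1e10)
--     while left <= right:
--         mid = (left + right) >> 1
--         """找到最小的价格使得count>=limit"""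
--         if check(mid):
--             left = mid + 1
--         else:
--             right = mid - 1
--
--     if left == 0:
--         return sum(p * (p + 1) // 2 for p in product) % MOD
--
--     # 边界特判
--     allCount = sum((p - left + 1) for p in product if p >= left)
--     if allCount < limit:
--         left -= 1
--
--     res = 0
--     count = 0
--     for p in product:
--         if p >= left:
--             res += (p + left) * (p - left + 1) // 2
--             count += p - left + 1
--
--     res -= (count - limit) * left
--     return res % MOD
-- ===== SOURCE B (Python) =====
-- MOD = 10 ** 9 + 7
--
--
-- def maxInvestment(product, limit):
--     if limit <= 0:
--         return 0
--     heights = sorted((p for p in product if p >= 0), reverse=True)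
--     totalCount = sum(h + 1 for h in heights)
--     if totalCount < limit:
--         # more values requested than exist: take everything
--         return sum(p * (p + 1) // 2 for p in product) % MOD
--     # find the lowest value level t still taken: sweep value bands from the top;
--     # k products are alive in the band (nxt, h]
--     t = 0
--     taken = 0
--     for i, h in enumerate(heights):
--         nxt = heights[i + 1] if i + 1 < len(heights) else 0
--         k = i + 1
--         band = k * (h - nxt)
--         if taken + band >= limit:
--             t = h - (limit - taken + k - 1) // k + 1
--             break
--         taken += band
--     res = 0
--     cnt = 0
--     for h in heights:
--         if h >= t:
--             res += (h + t) * (h - t + 1) // 2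
--             cnt += h - t + 1
--     return (res - (cnt - limit) * t) % MOD
-- ===== Notes on version B (the rewrite author's own statement) =====
-- stated objective: faster
-- what changed: Replaces A's binary search over the price range [0,1e10] (each probe a full O(n) counting pass) with one descending sort of the nonnegative products and a single band sweep that finds the threshold value level directly, then sums with the same closed-form per-product formula.
-- intended difference: On limit < 0 A returns (limit*(10^10+1)) % (10^9+7) (e.g. 69 for limit=-1), an artefact of its unadjusted binary-search bound, while B returns 0, the intended value since a negative number of investment values cannot be bought. — e.g. on maxInvestment([], -1): A returns 69, B returns 0
import Mathlib
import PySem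

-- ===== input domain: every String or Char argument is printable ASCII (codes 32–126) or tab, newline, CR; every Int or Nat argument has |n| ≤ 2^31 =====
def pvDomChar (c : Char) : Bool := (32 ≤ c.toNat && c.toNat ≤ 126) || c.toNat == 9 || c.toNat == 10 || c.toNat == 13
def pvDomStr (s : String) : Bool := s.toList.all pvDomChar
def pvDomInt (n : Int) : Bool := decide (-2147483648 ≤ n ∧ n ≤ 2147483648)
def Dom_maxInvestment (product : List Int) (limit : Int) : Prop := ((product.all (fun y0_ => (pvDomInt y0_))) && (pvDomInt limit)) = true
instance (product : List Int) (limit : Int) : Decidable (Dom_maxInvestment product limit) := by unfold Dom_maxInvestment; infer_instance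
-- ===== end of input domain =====

-- B replaces A's 34-probe binary search over prices [0,1e10] by one descending sort plus a single
-- band sweep locating the threshold value level directly (objective: faster by a constant factor).

-- ===== PORT A =====
-- inner `check(mid)`: loop over product with running res and early `return True`
def checkGo (limit mid : Int) : List Int → Int → Bool
  | [], res => decide (limit ≤ res)
  | num :: rest, res =>
      let res' := res + max 0 (num - mid + 1)
      if limit ≤ res' then true else checkGo limit mid rest res'

-- the `while left <= right` binary-search loop; fuel only makes the loop total
-- (64 ≥ log2(1e10)+2 always suffices, proved below); `(left+right) >> 1` is exactly floor division by 2
def bsLoop (product : List Int) (limit : Int) : Nat → Int → Int → Int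
  | 0, left, _right => left
  | fuel + 1, left, right =>
      if left ≤ right then
        -- mid = (left + right) >> 1, i.e. floor((left+right)/2), inlined
        if checkGo limit (PySem.Int.floordiv (left + right) 2) product 0 then
          bsLoop product limit fuel (PySem.Int.floordiv (left + right) 2 + 1) right
        else bsLoop product limit fuel left (PySem.Int.floordiv (left + right) 2 - 1)
      else left

def maxInvestment (product : List Int) (limit : Int) : Int :=
  let left := bsLoop product limit 64 0 10000000000
  if left = 0 then
    PySem.Int.mod ((product.map (fun p => PySem.Int.floordiv (p * (p + 1)) 2)).sum) 1000000007
  else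
    let allCount := ((product.filter (fun p => decide (left ≤ p))).map (fun p => p - left + 1)).sum
    let left := if allCount < limit then left - 1 else left
    let rc := product.foldl (fun (rc : Int × Int) p =>
        if left ≤ p then (rc.1 + PySem.Int.floordiv ((p + left) * (p - left + 1)) 2, rc.2 + (p - left + 1))
        else rc) (0, 0)
    PySem.Int.mod (rc.1 - (rc.2 - limit) * left) 1000000007

-- ===== PORT B =====
-- the band-sweep `for i, h in enumerate(heights)` loop with its `break`; k = i + 1
def sweepT (limit : Int) : List Int → Int → Int → Int
  | [], _i, _taken => 0
  | h :: rest, i, taken =>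
      let nxt := match rest with | [] => 0 | n :: _ => n
      let band := (i + 1) * (h - nxt)
      if limit ≤ taken + band then
        h - PySem.Int.floordiv (limit - taken + (i + 1) - 1) (i + 1) + 1
      else sweepT limit rest (i + 1) (taken + band)

def maxInvestment_alt (product : List Int) (limit : Int) : Int :=
  if limit ≤ 0 then 0
  else
    let heights := PySem.List.sorted (product.filter (fun p => decide (0 ≤ p))) (fun x => x) true
    let totalCount := (heights.map (fun h => h + 1)).sum
    if totalCount < limit then
      PySem.Int.mod ((product.map (fun p => PySem.Int.floordiv (p * (p + 1)) 2)).sum) 1000000007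
    else
      let t := sweepT limit heights 0 0
      let rc := heights.foldl (fun (rc : Int × Int) h =>
          if t ≤ h then (rc.1 + PySem.Int.floordiv ((h + t) * (h - t + 1)) 2, rc.2 + (h - t + 1))
          else rc) (0, 0)
      PySem.Int.mod (rc.1 - (rc.2 - limit) * t) 1000000007

-- ===== PRECONDITION & SPEC =====
-- On limit < 0 A returns (limit*(10^10+1)) % (10^9+7), an artefact of its unadjusted binary-search
-- bound, while B returns 0, the intended value since a negative number of investment values
-- cannot be bought.
def D_maxInvestment (product : List Int) (limit : Int) : Prop := limit < 0
instance (product : List Int) (limit : Int) : Decidable (D_maxInvestment product limit) := by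
  unfold D_maxInvestment; infer_instance

def Spec_maxInvestment (product : List Int) (limit : Int) (out : Int) : Prop :=
  ¬ D_maxInvestment product limit → out = maxInvestment_alt product limit
instance (product : List Int) (limit : Int) (out : Int) : Decidable (Spec_maxInvestment product limit out) := by
  unfold Spec_maxInvestment; infer_instance

def pvDiffWitness_maxInvestment : List Int × Int := ([], -1)
def pvDiffWitnessOut_maxInvestment : Int × Int := (69, 0)

-- ===== CLAIM (what is proved, stated in full; the proofs are below) =====
def Claim_unchanged_maxInvestment : Prop := ∀ (product : List Int) (limit : Int), Dom_maxInvestment product limit → Spec_maxInvestment product limit (maxInvestment product limit)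
def Claim_changed_maxInvestment : Prop := Dom_maxInvestment (pvDiffWitness_maxInvestment.1) (pvDiffWitness_maxInvestment.2) ∧ D_maxInvestment (pvDiffWitness_maxInvestment.1) (pvDiffWitness_maxInvestment.2) ∧ maxInvestment (pvDiffWitness_maxInvestment.1) (pvDiffWitness_maxInvestment.2) = pvDiffWitnessOut_maxInvestment.1 ∧ maxInvestment_alt (pvDiffWitness_maxInvestment.1) (pvDiffWitness_maxInvestment.2) = pvDiffWitnessOut_maxInvestment.2 ∧ pvDiffWitnessOut_maxInvestment.1 ≠ pvDiffWitnessOut_maxInvestment.2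

-- ===== LEMMAS AND PROOFS =====

-- `cval xs m` = number of investment values ≥ m = Python's `sum(max(0, p - m + 1) for p in xs)`
def cval (xs : List Int) (m : Int) : Int := (xs.map (fun p => max 0 (p - m + 1))).sum

theorem cval_nil (m : Int) : cval [] m = 0 := rfl

theorem cval_cons (p : Int) (xs : List Int) (m : Int) :
    cval (p :: xs) m = max 0 (p - m + 1) + cval xs m := by
  simp [cval]

theorem cval_nonneg (xs : List Int) (m : Int) : 0 ≤ cval xs m := by
  induction xs with
  | nil => simp [cval]
  | cons p xs ih => rw [cval_cons]; have := le_max_left 0 (p - m + 1); omega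

theorem cval_antitone (xs : List Int) {m m' : Int} (h : m ≤ m') : cval xs m' ≤ cval xs m := by
  induction xs with
  | nil => simp [cval]
  | cons p xs ih =>
      rw [cval_cons, cval_cons]
      have h1 : max 0 (p - m' + 1) ≤ max 0 (p - m + 1) := by omega
      omega

theorem cval_eq_zero (xs : List Int) (m : Int) (h : ∀ p ∈ xs, p - m + 1 ≤ 0) : cval xs m = 0 := by
  induction xs with
  | nil => rfl
  | cons p xs ih =>
      rw [cval_cons, ih (fun q hq => h q (by simp [hq]))]
      have := h p (by simp); omega

theorem checkGo_eq (limit mid : Int) (xs : List Int) (res : Int) :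
    checkGo limit mid xs res = decide (limit ≤ res + cval xs mid) := by
  induction xs generalizing res with
  | nil => rw [checkGo, cval_nil, add_zero]
  | cons p xs ih =>
      rw [checkGo, cval_cons]
      split
      · next h => have := cval_nonneg xs mid
                  symm; rw [decide_eq_true_eq]; omega
      · next h => rw [ih]; congr 1; simp only [eq_iff_iff]; omega

theorem bsLoop_spec (product : List Int) (limit : Int) (fuel : Nat) (left right : Int)
    (h0 : 0 ≤ left) (h1 : right ≤ 10000000000) (h2 : left ≤ right + 1)
    (hf : right + 1 - left < 2 ^ fuel)
    (inv1 : ∀ m, 0 ≤ m → m < left → limit ≤ cval product m)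
    (inv2 : ∀ m, right < m → m ≤ 10000000000 → cval product m < limit) :
    0 ≤ bsLoop product limit fuel left right ∧
    bsLoop product limit fuel left right ≤ 10000000001 ∧
    (∀ m, 0 ≤ m → m < bsLoop product limit fuel left right → limit ≤ cval product m) ∧
    (∀ m, bsLoop product limit fuel left right ≤ m → m ≤ 10000000000 → cval product m < limit) := by
  induction fuel generalizing left right with
  | zero =>
      simp only [pow_zero] at hf
      have hlr : left = right + 1 := by omega
      refine ⟨h0, by simp [bsLoop]; omega, ?_, ?_⟩
      · intro m hm hml; exact inv1 m hm (by simpa [bsLoop] using hml)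
      · intro m hml hmr; exact inv2 m (by simp [bsLoop] at hml; omega) hmr
  | succ fuel ih =>
      rw [bsLoop]
      split
      · next hle =>
          have hbr : 2 * PySem.Int.floordiv (left + right) 2 ≤ left + right ∧
              left + right ≤ 2 * PySem.Int.floordiv (left + right) 2 + 1 := by
            constructor <;>
              [have := PySem.Int.floordiv_mul_add_mod (left + right) 2;
               have := PySem.Int.floordiv_mul_add_mod (left + right) 2] <;>
              (have h1' := PySem.Int.mod_nonneg (left + right) (b := 2) (by norm_num);
               have h2' := PySem.Int.mod_lt (left + right) (b := 2) (by norm_num); omega)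
          split
          · next hchk =>
              rw [checkGo_eq] at hchk
              have hc : limit ≤ cval product (PySem.Int.floordiv (left + right) 2) := by
                simpa using hchk
              exact ih (PySem.Int.floordiv (left + right) 2 + 1) right (by omega) h1 (by omega)
                (by omega)
                (fun m hm hml => by
                  by_cases hml' : m < left
                  · exact inv1 m hm hml'
                  · exact le_trans hc (cval_antitone product (by omega)))
                inv2
          · next hchk =>
              rw [checkGo_eq] at hchk
              have hc : cval product (PySem.Int.floordiv (left + right) 2) < limit := by
                simpa using hchk
              exact ih left (PySem.Int.floordiv (left + right) 2 - 1) h0 (by omega) (by omega)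
                (by omega)
                inv1
                (fun m hml hmr => by
                  by_cases hml' : right < m
                  · exact inv2 m hml' hmr
                  · exact lt_of_le_of_lt (cval_antitone product (by omega)) hc)
      · next hgt =>
          have hlr : left = right + 1 := by omega
          exact ⟨h0, by omega, inv1, fun m hml hmr => inv2 m (by omega) hmr⟩


theorem filterSum_eq_cval (xs : List Int) (L : Int) :
    ((xs.filter (fun p => decide (L ≤ p))).map (fun p => p - L + 1)).sum = cval xs L := by
  induction xs with
  | nil => rfl
  | cons p xs ih =>
      rw [cval_cons]
      by_cases h : L ≤ p
      · rw [List.filter_cons_of_pos (by simpa using h), List.map_cons, List.sum_cons, ih]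
        omega
      · rw [List.filter_cons_of_neg (by simpa using h), ih]
        omega

theorem foldl_pair (t : Int) (g h : Int → Int) (xs : List Int) (r c : Int) :
    xs.foldl (fun (rc : Int × Int) p => if t ≤ p then (rc.1 + g p, rc.2 + h p) else rc) (r, c)
      = (r + ((xs.filter (fun p => decide (t ≤ p))).map g).sum,
         c + ((xs.filter (fun p => decide (t ≤ p))).map h).sum) := by
  induction xs generalizing r c with
  | nil => simp
  | cons p xs ih =>
      by_cases hp : t ≤ p
      · rw [List.foldl_cons, if_pos hp, ih,
          List.filter_cons_of_pos (by simpa using hp), List.map_cons, List.map_cons,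
          List.sum_cons, List.sum_cons]
        simp only [Prod.mk.injEq]
        constructor <;> ring
      · rw [List.foldl_cons, if_neg hp, ih,
          List.filter_cons_of_neg (by simpa using hp)]

theorem cval_perm {xs ys : List Int} (h : xs.Perm ys) (m : Int) : cval xs m = cval ys m :=
  (h.map _).sum_eq

theorem cval_filter_nonneg (xs : List Int) (m : Int) (hm : 0 ≤ m) :
    cval (xs.filter (fun p => decide (0 ≤ p))) m = cval xs m := by
  induction xs with
  | nil => rfl
  | cons p xs ih =>
      by_cases hp : (0:Int) ≤ p
      · rw [List.filter_cons_of_pos (by simpa using hp), cval_cons, cval_cons, ih]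
      · rw [List.filter_cons_of_neg (by simpa using hp), cval_cons, ih]
        omega

theorem count0_eq (xs : List Int) :
    ((xs.filter (fun p => decide ((0:Int) ≤ p))).map (fun h => h + 1)).sum = cval xs 0 := by
  induction xs with
  | nil => rfl
  | cons p xs ih =>
      rw [cval_cons]
      by_cases hp : (0:Int) ≤ p
      · rw [List.filter_cons_of_pos (by simpa using hp), List.map_cons, List.sum_cons, ih]
        omega
      · rw [List.filter_cons_of_neg (by simpa using hp), ih]
        omega

theorem headD_max (s : List Int) (hs : s.Pairwise (fun a b => b ≤ a)) :
    ∀ p ∈ s, p ≤ s.headD 0 := by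
  cases s with
  | nil => intro p hp; simp at hp
  | cons h rest =>
      intro p hp
      rcases List.mem_cons.mp hp with rfl | hp
      · simp
      · simpa using (List.pairwise_cons.mp hs).1 p hp

theorem filter_ge_filter_nonneg (xs : List Int) (t : Int) (ht : 0 ≤ t) :
    (xs.filter (fun p => decide ((0:Int) ≤ p))).filter (fun p => decide (t ≤ p))
      = xs.filter (fun p => decide (t ≤ p)) := by
  induction xs with
  | nil => rfl
  | cons p xs ih =>
      by_cases hp : (0:Int) ≤ p
      · rw [List.filter_cons_of_pos (by simpa using hp)]
        by_cases htp : t ≤ p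
        · rw [List.filter_cons_of_pos (by simpa using htp),
            List.filter_cons_of_pos (by simpa using htp), ih]
        · rw [List.filter_cons_of_neg (by simpa using htp),
            List.filter_cons_of_neg (by simpa using htp), ih]
      · have htp : ¬ t ≤ p := by omega
        rw [List.filter_cons_of_neg (by simpa using hp),
          List.filter_cons_of_neg (by simpa using htp), ih]

theorem t_unique (xs : List Int) (limit t1 t2 : Int)
    (h1 : limit ≤ cval xs t1) (h1' : cval xs (t1 + 1) < limit)
    (h2 : limit ≤ cval xs t2) (h2' : cval xs (t2 + 1) < limit) : t1 = t2 := by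
  rcases lt_trichotomy t1 t2 with h | h | h
  · have := cval_antitone xs (show t1 + 1 ≤ t2 by omega); omega
  · exact h
  · have := cval_antitone xs (show t2 + 1 ≤ t1 by omega); omega

theorem cval_step (xs : List Int) (a b : Int) (hab : a ≤ b)
    (hsplit : ∀ p ∈ xs, p ≤ a ∨ b ≤ p) :
    cval xs (a + 1) = cval xs (b + 1) + (xs.countP (fun p => decide (b ≤ p)) : Int) * (b - a) := by
  induction xs with
  | nil => simp [cval]
  | cons p xs ih =>
      have ih' := ih (fun q hq => hsplit q (by simp [hq]))
      rw [cval_cons, cval_cons, List.countP_cons]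
      by_cases hb : b ≤ p
      · simp only [hb, decide_true, if_pos]
        have e1 : max 0 (p - (a + 1) + 1) = p - a := by omega
        have e2 : max 0 (p - (b + 1) + 1) = p - b := by omega
        rw [e1, e2]
        push_cast
        rw [ih']
        ring
      · have hpa : p ≤ a := by rcases hsplit p (by simp) with h | h; exact h; omega
        have hdb : decide (b ≤ p) = false := by simpa using hb
        simp only [hdb, Bool.false_eq_true, if_false, add_zero]
        have e1 : max 0 (p - (a + 1) + 1) = 0 := by omega
        have e2 : max 0 (p - (b + 1) + 1) = 0 := by omega
        rw [e1, e2, ih']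
        ring

theorem countP_band (pre rest : List Int) (h nxt : Int)
    (hpre : ∀ p ∈ pre, h ≤ p) (hrest : ∀ p ∈ rest, p ≤ nxt) (hlt : nxt < h) :
    ((pre ++ h :: rest).countP (fun p => decide (h ≤ p)) : Int) = (pre.length : Int) + 1 := by
  rw [List.countP_append, List.countP_cons]
  have e1 : pre.countP (fun p => decide (h ≤ p)) = pre.length :=
    List.countP_eq_length.mpr (fun a ha => by simpa using hpre a ha)
  have e2 : rest.countP (fun p => decide (h ≤ p)) = 0 :=
    List.countP_eq_zero.mpr (fun a ha => by simpa using by have := hrest a ha; omega)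
  simp [e1, e2]

theorem match_headD (rest : List Int) :
    (match rest with | [] => (0:Int) | n :: _ => n) = rest.headD 0 := by
  cases rest <;> rfl

theorem sweep_spec (limit : Int) (hlim : 1 ≤ limit) :
    ∀ (s pre : List Int) (taken : Int),
      (pre ++ s).Pairwise (fun a b => b ≤ a) →
      (∀ h ∈ pre ++ s, 0 ≤ h) →
      taken = cval (pre ++ s) (s.headD 0 + 1) →
      taken < limit →
      limit ≤ cval (pre ++ s) 0 →
      0 ≤ sweepT limit s (pre.length : Int) taken ∧
      limit ≤ cval (pre ++ s) (sweepT limit s (pre.length : Int) taken) ∧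
      cval (pre ++ s) (sweepT limit s (pre.length : Int) taken + 1) < limit := by
  intro s
  induction s with
  | nil =>
      intro pre taken _hp _hpos htaken htl hlim0
      simp only [List.headD_nil, List.append_nil] at htaken hlim0 ⊢
      norm_num at htaken
      refine ⟨le_rfl, ?_, ?_⟩
      · simpa [sweepT] using hlim0
      · simpa [sweepT, ← htaken] using htl
  | cons h rest ih =>
      intro pre taken hpair hpos htaken htl hlim0
      simp only [List.headD_cons] at htaken
      have hSassoc : pre ++ h :: rest = (pre ++ [h]) ++ rest := by simp
      have hpre_ge : ∀ p ∈ pre, h ≤ p := by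
        intro p hp
        exact (List.pairwise_append.mp hpair).2.2 p hp h (by simp)
      have hrest_pair : rest.Pairwise (fun a b => b ≤ a) :=
        (List.pairwise_cons.mp (List.pairwise_append.mp hpair).2.1).2
      have hrest_le : ∀ p ∈ rest, p ≤ rest.headD 0 := headD_max rest hrest_pair
      have hh1 : 0 ≤ h := hpos h (by simp)
      have hnxt_le_h : rest.headD 0 ≤ h := by
        cases rest with
        | nil => simp only [List.headD_nil]; omega
        | cons n rest' =>
            simpa using (List.pairwise_cons.mp (List.pairwise_append.mp hpair).2.1).1 n (by simp)
      have hnxt_nonneg : 0 ≤ rest.headD 0 := by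
        cases rest with
        | nil => simp
        | cons n rest' =>
            have := hpos n (by simp)
            simp only [List.headD_cons]; omega
      have hsplit : ∀ p ∈ pre ++ h :: rest, p ≤ rest.headD 0 ∨ h ≤ p := by
        intro p hp
        rcases List.mem_append.mp hp with hp | hp
        · exact Or.inr (hpre_ge p hp)
        · rcases List.mem_cons.mp hp with rfl | hp
          · exact Or.inr le_rfl
          · exact Or.inl (hrest_le p hp)
      have hband : cval (pre ++ h :: rest) (rest.headD 0 + 1)
          = taken + ((pre.length : Int) + 1) * (h - rest.headD 0) := by
        rw [cval_step (pre ++ h :: rest) (rest.headD 0) h hnxt_le_h hsplit]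
        rw [← htaken]
        rcases eq_or_lt_of_le hnxt_le_h with he | hlt
        · rw [he]; ring
        · rw [countP_band pre rest h (rest.headD 0) hpre_ge hrest_le hlt]
      simp only [sweepT]
      rw [match_headD]
      split
      · next hbrk =>
          -- the break: the threshold lies in this band
          set k : Int := (pre.length : Int) with hk
          have hkpos : (0:Int) < k + 1 := by positivity
          set q : Int := PySem.Int.floordiv (limit - taken + (k + 1) - 1) (k + 1) with hq
          have hbr := (PySem.Int.floordiv_eq_iff_of_pos
            (a := limit - taken + (k + 1) - 1) (b := k + 1) (q := q) hkpos).mp rfl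
          have hband_pos : 0 < h - rest.headD 0 := by
            by_contra hcon
            have h1 : (k + 1) * (h - rest.headD 0) ≤ 0 :=
              mul_nonpos_of_nonneg_of_nonpos (by omega) (by omega)
            generalize hB : (k + 1) * (h - rest.headD 0) = B at h1 hbrk
            omega
          have hcount : ((pre ++ h :: rest).countP (fun p => decide (h ≤ p)) : Int) = k + 1 :=
            countP_band pre rest h (rest.headD 0) hpre_ge hrest_le (by omega)
          -- ceil bracket: (q-1)(k+1) < need ≤ q(k+1) where need = limit - taken
          have hqk1 : q * (k + 1) ≤ limit - taken + k := by
            have := hbr.1; omega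
          have hqk2 : limit - taken + k < (q + 1) * (k + 1) := by
            have := hbr.2; omega
          have hexp : (q + 1) * (k + 1) = q * (k + 1) + k + 1 := by ring
          have hq1 : 1 ≤ q := by
            by_contra hcon
            have hq0 : q + 1 ≤ 1 := by omega
            have : (q + 1) * (k + 1) ≤ 1 * (k + 1) :=
              mul_le_mul_of_nonneg_right hq0 (by omega)
            omega
          have hqle : q ≤ h - rest.headD 0 := by
            by_contra hcon
            have hge : h - rest.headD 0 + 1 ≤ q := by omega
            have h1 : (h - rest.headD 0 + 1) * (k + 1) ≤ q * (k + 1) :=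
              mul_le_mul_of_nonneg_right hge (by omega)
            nlinarith [hbrk, hqk1]
          set t : Int := h - q + 1 with ht
          have htval : cval (pre ++ h :: rest) t = taken + (k + 1) * q := by
            have hst : ∀ p ∈ pre ++ h :: rest, p ≤ t - 1 ∨ h ≤ p := by
              intro p hp
              rcases hsplit p hp with hp' | hp'
              · exact Or.inl (by omega)
              · exact Or.inr hp'
            have hcs := cval_step (pre ++ h :: rest) (t - 1) h (by omega) hst
            rw [show t - 1 + 1 = t by ring] at hcs
            rw [hcs, hcount, ← htaken, show h - (t - 1) = q by omega, mul_comm]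
          have htval1 : cval (pre ++ h :: rest) (t + 1) = taken + (k + 1) * (q - 1) := by
            have hst : ∀ p ∈ pre ++ h :: rest, p ≤ t ∨ h ≤ p := by
              intro p hp
              rcases hsplit p hp with hp' | hp'
              · exact Or.inl (by omega)
              · exact Or.inr hp'
            have hcs := cval_step (pre ++ h :: rest) t h (by omega) hst
            rw [hcs, hcount, ← htaken, show h - t = q - 1 by omega, mul_comm]
          refine ⟨by omega, ?_, ?_⟩
          · rw [htval]
            have : limit - taken ≤ q * (k + 1) := by omega
            nlinarith
          · rw [htval1]
            have : (k + 1) * (q - 1) ≤ limit - taken - 1 := by nlinarith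
            omega
      · next hbrk =>
          -- no break: recurse on the rest of the bands
          have hres := ih (pre ++ [h])
            (taken + ((pre.length : Int) + 1) * (h - rest.headD 0))
            (by rw [← hSassoc]; exact hpair)
            (by rw [← hSassoc]; exact hpos)
            (by rw [← hSassoc, hband])
            (by omega)
            (by rw [← hSassoc]; exact hlim0)
          have hlen : ((pre ++ [h]).length : Int) = (pre.length : Int) + 1 := by
            simp
          rw [hlen, ← hSassoc] at hres
          exact hres

theorem maxInvestment_main (product : List Int) (limit : Int)
    (hdom : Dom_maxInvestment product limit) (hND : ¬ D_maxInvestment product limit) :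
    maxInvestment product limit = maxInvestment_alt product limit := by
  unfold Dom_maxInvestment at hdom
  rw [Bool.and_eq_true, List.all_eq_true] at hdom
  have hbp : ∀ p ∈ product, p ≤ 2147483648 := by
    intro p hp
    have := hdom.1 p hp
    simp only [pvDomInt, decide_eq_true_eq] at this
    omega
  unfold D_maxInvestment at hND
  have hnneg : 0 ≤ limit := by omega
  obtain ⟨hL0, hL1, hA, hB⟩ := bsLoop_spec product limit 64 0 10000000000
    le_rfl (by norm_num) (by norm_num) (by norm_num)
    (fun m hm hml => absurd hml (by omega))
    (fun m hml hmr => absurd hmr (by omega))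
  set L := bsLoop product limit 64 0 10000000000 with hLdef
  have hcap : cval product 10000000000 = 0 :=
    cval_eq_zero _ _ (fun p hp => by have := hbp p hp; omega)
  by_cases hl0 : limit = 0
  · -- limit = 0: both sides return 0
    have hLtop : L = 10000000001 := by
      by_contra hc
      have h1 := hB L le_rfl (by omega)
      have h2 := cval_nonneg product L
      omega
    have hfilter : product.filter (fun p => decide (L ≤ p)) = [] :=
      List.filter_eq_nil_iff.mpr (fun p hp => by
        have := hbp p hp
        simp only [decide_eq_true_eq]
        omega)
    have hAval : maxInvestment product limit = 0 := by
      simp only [maxInvestment]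
      rw [← hLdef, if_neg (by omega)]
      rw [hfilter]
      simp only [List.map_nil, List.sum_nil]
      rw [if_neg (by omega)]
      rw [foldl_pair L (fun p => PySem.Int.floordiv ((p + L) * (p - L + 1)) 2)
        (fun p => p - L + 1) product 0 0]
      rw [hfilter]
      simp only [List.map_nil, List.sum_nil, add_zero]
      norm_num [hl0]
    have hBval : maxInvestment_alt product limit = 0 := by
      rw [maxInvestment_alt, if_pos (by omega)]
    rw [hAval, hBval]
  · have hl1 : 1 ≤ limit := by omega
    set heights := PySem.List.sorted (product.filter (fun p => decide ((0:Int) ≤ p))) (fun x => x) true with hhts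
    have hperm : heights.Perm (product.filter (fun p => decide ((0:Int) ≤ p))) :=
      PySem.List.sorted_perm _ _ _
    have hpairw : heights.Pairwise (fun a b => b ≤ a) :=
      PySem.List.sorted_pairwise_rev _ _
    have hmem : ∀ h ∈ heights, 0 ≤ h := by
      intro h hh
      have := List.mem_filter.mp (hperm.mem_iff.mp hh)
      simp only [decide_eq_true_eq] at this
      omega
    have hcw : ∀ m, 0 ≤ m → cval heights m = cval product m := fun m hm => by
      rw [cval_perm hperm, cval_filter_nonneg _ _ hm]
    have htotal : (heights.map (fun h => h + 1)).sum = cval product 0 := by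
      rw [← count0_eq product]
      exact (hperm.map (fun h => h + 1)).sum_eq
    by_cases hbig : cval product 0 < limit
    · -- more values requested than exist: both return the blind sum
      have hLz : L = 0 := by
        by_contra hc
        have := hA 0 le_rfl (by omega)
        omega
      simp only [maxInvestment]
      rw [← hLdef, if_pos hLz]
      simp only [maxInvestment_alt]
      rw [if_neg (by omega), ← hhts, if_pos (by rw [htotal]; exact hbig)]
    · -- main branch: the threshold exists; both sides take it
      push_neg at hbig
      have hL2 : 1 ≤ L := by
        by_contra hc
        have := hB 0 (by omega) (by norm_num)
        omega
      have hLcap : L ≤ 10000000000 := by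
        by_contra hc
        have := hA 10000000000 (by norm_num) (by omega)
        omega
      have htA1 : limit ≤ cval product (L - 1) := hA (L - 1) (by omega) (by omega)
      have htA2 : cval product L < limit := hB L le_rfl hLcap
      have hsw := sweep_spec limit hl1 heights [] 0
        (by simpa using hpairw) (by simpa using hmem)
        (by
          simp only [List.nil_append]
          symm
          exact cval_eq_zero _ _ (fun p hp => by
            have := headD_max heights hpairw p hp
            omega))
        (by omega)
        (by
          simp only [List.nil_append]
          rw [hcw 0 le_rfl]
          exact hbig)
      simp only [List.nil_append, List.length_nil, Nat.cast_zero] at hsw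
      obtain ⟨htB1, htB2, htB3⟩ := hsw
      set tB := sweepT limit heights 0 0 with htBdef
      have htBp2 : limit ≤ cval product tB := by rw [← hcw tB htB1]; exact htB2
      have htBp3 : cval product (tB + 1) < limit := by rw [← hcw (tB + 1) (by omega)]; exact htB3
      have hteq : L - 1 = tB := t_unique product limit (L - 1) tB htA1
        (by rw [show L - 1 + 1 = L by ring]; exact htA2) htBp2 htBp3
      have hsums : ∀ g : Int → Int,
          ((heights.filter (fun p => decide (tB ≤ p))).map g).sum
            = ((product.filter (fun p => decide (tB ≤ p))).map g).sum := by
        intro g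
        have h1 := hperm.filter (fun p => decide (tB ≤ p))
        rw [filter_ge_filter_nonneg product tB htB1] at h1
        exact (h1.map g).sum_eq
      -- evaluate A
      simp only [maxInvestment]
      rw [← hLdef, if_neg (by omega), filterSum_eq_cval, if_pos htA2]
      rw [foldl_pair (L - 1) (fun p => PySem.Int.floordiv ((p + (L - 1)) * (p - (L - 1) + 1)) 2)
        (fun p => p - (L - 1) + 1) product 0 0]
      -- evaluate B
      simp only [maxInvestment_alt]
      rw [if_neg (by omega), ← hhts, if_neg (by rw [htotal]; omega), ← htBdef]
      rw [foldl_pair tB (fun p => PySem.Int.floordiv ((p + tB) * (p - tB + 1)) 2)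
        (fun p => p - tB + 1) heights 0 0]
      simp only [zero_add]
      rw [hteq]
      rw [hsums (fun p => PySem.Int.floordiv ((p + tB) * (p - tB + 1)) 2)]
      rw [filterSum_eq_cval, filterSum_eq_cval, hcw tB htB1]

-- ===== VERDICT (by name: the statement is the Claim_ definition above) =====
theorem maxInvestment_spec : Claim_unchanged_maxInvestment := by
  intro product limit hdom
  unfold Spec_maxInvestment
  intro hND
  exact maxInvestment_main product limit hdom hND

theorem maxInvestment_changed : Claim_changed_maxInvestment := by
  unfold Claim_changed_maxInvestment; decide
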